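-- pv_equiv track=rewrite | github.com/Minhtri-hub/AI_text_convert_image | streamlit_app.py | distribute_sentences
-- ===== SOURCE A (Python) =====
-- from typing import List, Optional
--
-- def distribute_sentences(sentences: List[str], target_groups: int) -> List[List[str]]:
--     """Evenly distribute sentences into ``target_groups`` sequential groups."""
--
--     groups: List[List[str]] = []
--     total = len(sentences)
--     base = total // target_groups
--     remainder = total % target_groups
--     index = 0
--     for group_idx in range(target_groups):
--         count = base + (1 if group_idx < remainder else 0)
--         if count == 0:
--             groups.append([])
--             continue
--         groups.append(sentences[index : index + count])
--         index += count
--     return groups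
-- ===== SOURCE B (Python) =====
-- from typing import List
--
-- def distribute_sentences(sentences: List[str], target_groups: int) -> List[List[str]]:
--     """Evenly distribute sentences into ``target_groups`` sequential groups."""
--     base, remainder = divmod(len(sentences), target_groups)
--     big = remainder * (base + 1)  # number of sentences living in the larger groups
--     buckets = {}
--     for i, s in enumerate(sentences):
--         g = i // (base + 1) if i < big else remainder + (i - big) // base
--         buckets.setdefault(g, []).append(s)
--     return [buckets.get(g, []) for g in range(target_groups)]
-- ===== Notes on version B (the rewrite author's own statement) =====
-- stated objective: alternative
-- what changed: Instead of slicing the list into chunks with a running start index, B assigns each sentence individually to a group computed in closed form from its own index (i//(base+1) in the oversized region, remainder+(i-big)//base after it), buckets sentences into a dict in one pass, and reads the groups back out of the dict; no slicing, no threaded accumulator, no count==0 branch.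
import Mathlib
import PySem

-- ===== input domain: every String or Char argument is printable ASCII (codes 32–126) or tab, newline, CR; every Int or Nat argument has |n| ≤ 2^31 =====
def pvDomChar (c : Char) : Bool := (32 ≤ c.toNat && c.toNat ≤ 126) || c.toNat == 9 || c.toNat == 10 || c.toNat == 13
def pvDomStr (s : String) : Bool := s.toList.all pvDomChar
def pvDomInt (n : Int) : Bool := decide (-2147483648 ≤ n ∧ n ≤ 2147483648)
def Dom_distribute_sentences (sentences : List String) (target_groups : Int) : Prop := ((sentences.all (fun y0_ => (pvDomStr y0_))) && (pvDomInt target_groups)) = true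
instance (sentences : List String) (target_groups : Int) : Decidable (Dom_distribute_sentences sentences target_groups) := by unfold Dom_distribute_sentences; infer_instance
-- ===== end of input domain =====

-- B assigns each sentence to a group computed in closed form from its own index and buckets
-- them into a dict in one pass, instead of slicing with a threaded start index (objective: alternative).


-- ===== PORT A =====
def distribute_sentences (sentences : List String) (target_groups : Int) : List (List String) :=
  let total : Int := (sentences.length : Int)
  let base := PySem.Int.floordiv total target_groups
  let rem := PySem.Int.mod total target_groups
  ((PySem.List.pyRange 0 target_groups 1).foldl
    (fun (st : List (List String) × Int) (gi : Int) =>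
      let count := base + (if gi < rem then (1:Int) else 0)
      if count = 0 then (st.1 ++ [([] : List String)], st.2)
      else (st.1 ++ [PySem.List.slice sentences (some st.2) (some (st.2 + count))], st.2 + count))
    ([], 0)).1

-- ===== PORT B =====
def distribute_sentences_alt (sentences : List String) (target_groups : Int) : List (List String) :=
  let total : Int := (sentences.length : Int)
  let base := PySem.Int.floordiv total target_groups
  let rem := PySem.Int.mod total target_groups
  let big := rem * (base + 1)
  -- buckets.setdefault(g, []).append(s)  ≡  d[g] = d.get(g, []) + [s]  =  Dict.modify g [] (· ++ [s]) (exact)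
  let buckets := (PySem.List.enumerate sentences 0).foldl
    (fun (d : PySem.Dict Int (List String)) p =>
      let g := if p.1 < big then PySem.Int.floordiv p.1 (base + 1)
               else rem + PySem.Int.floordiv (p.1 - big) base
      d.modify g [] (· ++ [p.2]))
    PySem.Dict.empty
  (PySem.List.pyRange 0 target_groups 1).map (fun g => buckets.getD g [])

-- ===== PRECONDITION & SPEC =====
-- Pre_ excludes target_groups = 0, on which both Pythons raise ZeroDivisionError.
def Pre_distribute_sentences (sentences : List String) (target_groups : Int) : Prop := target_groups ≠ 0
instance (sentences : List String) (target_groups : Int) : Decidable (Pre_distribute_sentences sentences target_groups) := by unfold Pre_distribute_sentences; infer_instance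
def pvWitness_distribute_sentences : List String × Int := (["a", "b", "c"], 2)
def Spec_distribute_sentences (sentences : List String) (target_groups : Int) (out : List (List String)) : Prop := out = distribute_sentences_alt sentences target_groups
instance (sentences : List String) (target_groups : Int) (out : List (List String)) : Decidable (Spec_distribute_sentences sentences target_groups out) := by unfold Spec_distribute_sentences; infer_instance

-- ===== CLAIM (what is proved, stated in full; the proofs are below) =====
def Claim_equal_distribute_sentences : Prop := ∀ (sentences : List String) (target_groups : Int), Dom_distribute_sentences sentences target_groups → Pre_distribute_sentences sentences target_groups → Spec_distribute_sentences sentences target_groups (distribute_sentences sentences target_groups)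

-- ===== LEMMAS AND PROOFS =====

lemma slice_self_nil (xs : List String) (i : Int) (hi : 0 ≤ i) :
    PySem.List.slice xs (some i) (some i) = [] := by
  obtain ⟨n, rfl⟩ := Int.eq_ofNat_of_zero_le hi
  rw [PySem.List.slice_natCast]
  simp

-- A's fold produces the closed-form slices (invariant: index = a*base + min a rem).
lemma fold_eq (sentences : List String) (base rem : Int) (hb : 0 ≤ base) (hr : 0 ≤ rem)
    (tg : Int) (a : Int) (ha : 0 ≤ a) (acc : List (List String))
    (i : Int) (hi : i = a * base + min a rem) :
    ((PySem.List.pyRange a tg 1).foldl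
      (fun (st : List (List String) × Int) (gi : Int) =>
        let count := base + (if gi < rem then (1:Int) else 0)
        if count = 0 then (st.1 ++ [([] : List String)], st.2)
        else (st.1 ++ [PySem.List.slice sentences (some st.2) (some (st.2 + count))], st.2 + count))
      (acc, i)).1
    = acc ++ (PySem.List.pyRange a tg 1).map (fun g =>
        PySem.List.slice sentences (some (g * base + min g rem))
          (some (g * base + min g rem + base + (if g < rem then (1:Int) else 0)))) := by
  subst hi
  by_cases hlt : a < tg
  · have hterm : (tg - (a + 1)).toNat < (tg - a).toNat := by omega
    rw [PySem.List.pyRange_one_cons hlt]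
    simp only [List.foldl_cons, List.map_cons]
    set count := base + (if a < rem then (1:Int) else 0) with hcount
    have hidx : 0 ≤ a * base + min a rem := by
      have : 0 ≤ a * base := mul_nonneg ha hb
      rcases le_total a rem with h | h <;> simp [min_def] <;> omega
    have hnext : a * base + min a rem + count = (a + 1) * base + min (a + 1) rem := by
      rcases lt_or_ge a rem with h | h
      · simp only [hcount, if_pos h]
        have h1 : min a rem = a := min_eq_left (le_of_lt h)
        have h2 : min (a + 1) rem = a + 1 := min_eq_left (by omega)
        rw [h1, h2]; ring
      · simp only [hcount, if_neg (not_lt.mpr h)]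
        have h1 : min a rem = rem := min_eq_right h
        have h2 : min (a + 1) rem = rem := min_eq_right (by omega)
        rw [h1, h2]; ring
    by_cases hz : count = 0
    · have hstep :
        ((acc, a * base + min a rem).1 ++ [([] : List String)], (acc, a * base + min a rem).2)
          = (acc ++ [PySem.List.slice sentences (some (a * base + min a rem))
              (some (a * base + min a rem + count))], (a + 1) * base + min (a + 1) rem) := by
        have : PySem.List.slice sentences (some (a * base + min a rem))
            (some (a * base + min a rem + count)) = [] := by
          rw [hz, add_zero]; exact slice_self_nil _ _ hidx
        rw [this]
        have : a * base + min a rem = (a + 1) * base + min (a + 1) rem := by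
          rw [← hnext, hz, add_zero]
        simp [this]
      simp only [if_pos hz]
      rw [hstep, fold_eq sentences base rem hb hr tg (a + 1) (by omega) _ _ rfl]
      simp [hcount, add_assoc]
    · have hend : (a + 1) * base + min (a + 1) rem
          = a * base + min a rem + base + (if a < rem then (1:Int) else 0) := by
        rw [← hnext, hcount]; ring
      simp only [if_neg hz]
      rw [hnext, fold_eq sentences base rem hb hr tg (a + 1) (by omega) _ _ rfl, hend]
      simp [add_assoc]
  · rw [PySem.List.pyRange_one_eq_nil (by omega)]
    simp
termination_by (tg - a).toNat

-- B's per-index group formula hits group g exactly on A's slice interval for that group.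
lemma gkey_iff (base rem kk i g : Int) (hb : 0 ≤ base) (hrk : rem < kk)
    (hn : i < base * kk + rem) :
    ((if i < rem * (base + 1) then PySem.Int.floordiv i (base + 1)
      else rem + PySem.Int.floordiv (i - rem * (base + 1)) base) = g)
    ↔ (g * base + min g rem ≤ i ∧
        i < g * base + min g rem + base + (if g < rem then (1:Int) else 0)) := by
  have hb1 : (0:Int) < base + 1 := by omega
  rcases lt_or_ge g rem with hgr | hgr
  · -- g < rem : window is [g*(base+1), (g+1)*(base+1))
    have hmin : min g rem = g := min_eq_left (le_of_lt hgr)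
    rw [hmin, if_pos hgr]
    have hR : (g * base + g ≤ i ∧ i < g * base + g + base + 1)
        ↔ (g * (base + 1) ≤ i ∧ i < (g + 1) * (base + 1)) := by
      constructor <;> intro h <;> constructor <;> nlinarith [h.1, h.2]
    rw [hR, ← PySem.Int.floordiv_eq_iff_of_pos hb1]
    by_cases hib : i < rem * (base + 1)
    · rw [if_pos hib]
    · rw [if_neg hib]
      push_neg at hib
      -- here base > 0 and the else value is ≥ rem > g
      have hbpos : 0 < base := by nlinarith
      have h0 : 0 ≤ PySem.Int.floordiv (i - rem * (base + 1)) base := by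
        rw [PySem.Int.floordiv_eq_ediv_of_pos hbpos]
        exact Int.ediv_nonneg (by omega) (le_of_lt hbpos)
      constructor
      · intro h; omega
      · intro h
        -- floordiv i (base+1) = g < rem means i < rem*(base+1): contradiction
        rw [PySem.Int.floordiv_eq_iff_of_pos hb1] at h
        nlinarith [h.2]
  · -- rem ≤ g
    have hmin : min g rem = rem := min_eq_right hgr
    rw [hmin, if_neg (not_lt.mpr hgr)]
    by_cases hb0 : base = 0
    · -- both sides false
      subst hb0
      simp only [zero_add, mul_zero, add_zero] at *
      have hib : i < rem * 1 := by omega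
      rw [if_pos hib]
      have : PySem.Int.floordiv i 1 = i := by
        rw [PySem.Int.floordiv_eq_iff_of_pos (by omega)]; omega
      rw [this]
      constructor
      · intro h; omega
      · intro h; omega
    · have hbpos : 0 < base := by omega
      have hib : ¬ i < rem * (base + 1) → True := fun _ => trivial
      have hkey : ∀ j : Int, 0 ≤ j →
          (PySem.Int.floordiv j base = g - rem ↔ (g - rem) * base ≤ j ∧ j < (g - rem + 1) * base) :=
        fun j _ => PySem.Int.floordiv_eq_iff_of_pos hbpos
      by_cases hibig : i < rem * (base + 1)
      · rw [if_pos hibig]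
        -- LHS would force g < rem: both sides false
        constructor
        · intro h
          rw [PySem.Int.floordiv_eq_iff_of_pos hb1] at h
          nlinarith [h.1]
        · intro h
          exfalso; nlinarith [h.1]
      · rw [if_neg hibig]
        push_neg at hibig
        have : (rem + PySem.Int.floordiv (i - rem * (base + 1)) base = g)
            ↔ PySem.Int.floordiv (i - rem * (base + 1)) base = g - rem := by omega
        rw [this, PySem.Int.floordiv_eq_iff_of_pos hbpos]
        constructor
        · intro h
          constructor <;> nlinarith [h.1, h.2]
        · intro h
          constructor <;> nlinarith [h.1, h.2]


-- the filtered enumeration over an index window is the corresponding drop/take.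
lemma filt {α : Type} (xs : List α) (s a b : Nat) (hsa : s ≤ a) :
    ((PySem.List.enumerate xs (s : Int)).filter
        (fun p => decide ((a : Int) ≤ p.1 ∧ p.1 < (b : Int)))).map (·.2)
    = (xs.drop (a - s)).take (b - a) := by
  induction xs generalizing s a with
  | nil => simp [PySem.List.enumerate_nil]
  | cons x xs ih =>
    rw [PySem.List.enumerate_cons, List.filter_cons]
    rcases lt_or_ge s a with hlt | hge
    · -- head index s < a: dropped
      have hc : (decide ((a : Int) ≤ ((s : Int), x).1 ∧ ((s : Int), x).1 < (b : Int))) = false := by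
        simp; omega
      rw [hc]
      simp only [Bool.false_eq_true, if_false]
      have : ((s : Int)) + 1 = ((s + 1 : Nat) : Int) := by push_cast; ring
      rw [this, ih (s + 1) a (by omega)]
      have hd : List.drop (a - s) (x :: xs) = List.drop (a - (s + 1)) xs := by
        have : a - s = (a - (s + 1)) + 1 := by omega
        rw [this, List.drop_succ_cons]
      rw [hd]
    · -- s = a
      have hse : s = a := by omega
      subst hse
      rcases lt_or_ge s b with hab | hba
      case inr =>
        -- empty window
        have hc : (decide ((s : Int) ≤ ((s : Int), x).1 ∧ ((s : Int), x).1 < (b : Int))) = false := by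
          simp; omega
        rw [hc]
        simp only [Bool.false_eq_true, if_false]
        have hnil : (PySem.List.enumerate xs ((s : Int) + 1)).filter
            (fun p => decide ((s : Int) ≤ p.1 ∧ p.1 < (b : Int))) = [] := by
          apply List.filter_eq_nil_iff.mpr
          intro p hp
          rw [PySem.List.mem_enumerate_iff] at hp
          obtain ⟨k, hk, rfl⟩ := hp
          simp; omega
        rw [hnil]
        have : b - s = 0 := by omega
        simp [this]
      case inl =>
        -- head kept
        have hc : (decide ((s : Int) ≤ ((s : Int), x).1 ∧ ((s : Int), x).1 < (b : Int))) = true := by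
          simp; omega
        rw [hc]
        simp only [if_true]
        have hcongr : (PySem.List.enumerate xs ((s : Int) + 1)).filter
              (fun p => decide ((s : Int) ≤ p.1 ∧ p.1 < (b : Int)))
            = (PySem.List.enumerate xs ((s : Int) + 1)).filter
              (fun p => decide (((s + 1 : Nat) : Int) ≤ p.1 ∧ p.1 < (b : Int))) := by
          apply List.filter_congr
          intro p hp
          rw [PySem.List.mem_enumerate_iff] at hp
          obtain ⟨k, hk, rfl⟩ := hp
          simp only [decide_eq_decide]
          push_cast
          omega
        have hcast : ((s : Int)) + 1 = ((s + 1 : Nat) : Int) := by push_cast; ring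
        rw [List.map_cons, hcongr, hcast, ih (s + 1) (s + 1) le_rfl]
        have h1 : s + 1 - (s + 1) = 0 := by omega
        have h2 : s - s = 0 := by omega
        rw [h1, h2, List.drop_zero, List.drop_zero]
        have h3 : b - s = (b - (s + 1)) + 1 := by omega
        rw [h3, List.take_succ_cons]


theorem distribute_sentences_spec : Claim_equal_distribute_sentences := by
  intro xs tg _ hpre
  unfold Spec_distribute_sentences distribute_sentences distribute_sentences_alt
  simp only []
  rcases lt_trichotomy tg 0 with h | h | h
  · rw [PySem.List.pyRange_one_eq_nil (by omega)]
    simp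
  · exact absurd h hpre
  · -- tg > 0
    have hb : 0 ≤ PySem.Int.floordiv (xs.length : Int) tg := by
      rw [PySem.Int.floordiv_eq_ediv_of_pos h]
      exact Int.ediv_nonneg (by positivity) (le_of_lt h)
    have hr : 0 ≤ PySem.Int.mod (xs.length : Int) tg := PySem.Int.mod_nonneg _ h
    have hrk : PySem.Int.mod (xs.length : Int) tg < tg := PySem.Int.mod_lt _ h
    have hsum : PySem.Int.floordiv (xs.length : Int) tg * tg + PySem.Int.mod (xs.length : Int) tg
        = (xs.length : Int) := PySem.Int.floordiv_mul_add_mod _ _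
    set base := PySem.Int.floordiv (xs.length : Int) tg with hbase
    set rem := PySem.Int.mod (xs.length : Int) tg with hrem
    rw [fold_eq xs _ _ hb hr tg 0 le_rfl [] 0 (by rw [min_eq_left hr]; ring), List.nil_append]
    apply List.map_congr_left
    intro g hg
    rw [PySem.List.mem_pyRange_one] at hg
    -- B's bucket for g
    have hfold :
        (PySem.List.enumerate xs 0).foldl
          (fun (d : PySem.Dict Int (List String)) p =>
            d.modify (if p.1 < rem * (base + 1) then PySem.Int.floordiv p.1 (base + 1)
                      else rem + PySem.Int.floordiv (p.1 - rem * (base + 1)) base) [] (· ++ [p.2]))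
          PySem.Dict.empty
        = ((PySem.List.enumerate xs 0).map
            (fun p => ((if p.1 < rem * (base + 1) then PySem.Int.floordiv p.1 (base + 1)
                        else rem + PySem.Int.floordiv (p.1 - rem * (base + 1)) base), p.2))).foldl
            (fun (d : PySem.Dict Int (List String)) q => d.modify q.1 [] (· ++ [q.2]))
            PySem.Dict.empty := by rw [List.foldl_map]
    rw [hfold, PySem.Dict.getD_foldl_modify_append, PySem.Dict.getD_empty, List.nil_append,
      List.filter_map, List.map_map]
    simp only [Function.comp_def]
    have hpred :
        ((PySem.List.enumerate xs 0).filter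
          (fun p => (if p.1 < rem * (base + 1) then PySem.Int.floordiv p.1 (base + 1)
                     else rem + PySem.Int.floordiv (p.1 - rem * (base + 1)) base) == g))
        = ((PySem.List.enumerate xs 0).filter
          (fun p => decide (g * base + min g rem ≤ p.1 ∧
              p.1 < g * base + min g rem + base + (if g < rem then (1:Int) else 0)))) := by
      apply List.filter_congr
      intro p hp
      rw [PySem.List.mem_enumerate_iff] at hp
      obtain ⟨k, hk, rfl⟩ := hp
      rw [Bool.eq_iff_iff]
      simp only [beq_iff_eq, decide_eq_true_eq]
      exact gkey_iff base rem tg _ g hb hrk (by rw [hsum]; omega)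
    rw [hpred]
    -- identify the window with Nat bounds and finish via filt and slice_toNat
    have hs0 : 0 ≤ g * base + min g rem := by
      have h1 : 0 ≤ g * base := mul_nonneg (by omega) hb
      omega
    have hc0 : 0 ≤ base + (if g < rem then (1:Int) else 0) := by
      split_ifs <;> omega
    set start := g * base + min g rem with hstart
    set stop := g * base + min g rem + base + (if g < rem then (1:Int) else 0) with hstop
    have hs1 : start = ((start.toNat : Nat) : Int) := (Int.toNat_of_nonneg hs0).symm
    have hs2 : stop = ((stop.toNat : Nat) : Int) := (Int.toNat_of_nonneg (by rw [hstop]; omega)).symm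
    have henum : (PySem.List.enumerate xs 0) = (PySem.List.enumerate xs ((0 : Nat) : Int)) := by norm_num
    have hfilt := filt xs 0 start.toNat stop.toNat (Nat.zero_le _)
    rw [henum, hs1, hs2]
    rw [hfilt, PySem.List.slice_natCast]
    simp
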